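-- pv_equiv track=rewrite | github.com/zazyzaya/NestedGraphs | train_multigpu.py | fair_scheduler
-- ===== SOURCE A (Python) =====
-- def fair_scheduler(n_workers, costs):
--     '''
--     There's probably a better way to do this, but for now
--     just using greedy method. Costs is a list of tuples
--     s.t. each tuple is (d,id) where d is the degree of node
--     and id refers to the node id in the graph
--     '''
--     jobs = [[] for _ in range(n_workers)]
--     labor_scheduled = [0] * n_workers
--
--     while(costs):
--         to_schedule = costs.index(max(costs, key=lambda x : x[0]))
--         give_to = labor_scheduled.index(min(labor_scheduled))
--
--         cost, nid = costs.pop(to_schedule)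
--         labor_scheduled[give_to] += cost
--         jobs[give_to].append(nid)
--
--     return jobs
-- ===== SOURCE B (Python) =====
-- def fair_scheduler(n_workers, costs):
--     # Sort jobs once (stable, descending by degree) instead of repeatedly
--     # scanning for and popping the max.  Because the greedy rule always picks
--     # the FIRST least-loaded worker, and idle workers all carry load 0, the
--     # workers that ever receive a job form a prefix: keep only that prefix's
--     # loads, so each step scans len(costs) entries at most, not n_workers.
--     # Note: unlike the original, this does not empty the `costs` list in place.
--     pjobs = []   # job lists of the touched prefix of workers
--     loads = []   # their loads; every worker beyond the prefix has load 0
--     for cost, nid in sorted(costs, key=lambda c: c[0], reverse=True):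
--         if len(loads) < n_workers and (not loads or min(loads) > 0):
--             # a fresh worker (first index with load 0) is the least loaded
--             loads.append(0)
--             pjobs.append([])
--             w = len(loads) - 1
--         else:
--             w = loads.index(min(loads))  # min([]) raises when there are no workers
--         loads[w] += cost
--         pjobs[w].append(nid)
--     return pjobs + [[] for _ in range(n_workers - len(pjobs))]
-- ===== Notes on version B (the rewrite author's own statement) =====
-- stated objective: faster
-- what changed: Instead of rescanning the remaining job list for the max and popping it on every iteration and scanning all n_workers loads with min+index, B stably sorts the jobs once in descending degree order and keeps only the loads of the prefix of workers that ever received a job (idle workers all have load 0, and the greedy first-argmin rule only ever touches a prefix), padding the answer with empty job lists at the end.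
import Mathlib
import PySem

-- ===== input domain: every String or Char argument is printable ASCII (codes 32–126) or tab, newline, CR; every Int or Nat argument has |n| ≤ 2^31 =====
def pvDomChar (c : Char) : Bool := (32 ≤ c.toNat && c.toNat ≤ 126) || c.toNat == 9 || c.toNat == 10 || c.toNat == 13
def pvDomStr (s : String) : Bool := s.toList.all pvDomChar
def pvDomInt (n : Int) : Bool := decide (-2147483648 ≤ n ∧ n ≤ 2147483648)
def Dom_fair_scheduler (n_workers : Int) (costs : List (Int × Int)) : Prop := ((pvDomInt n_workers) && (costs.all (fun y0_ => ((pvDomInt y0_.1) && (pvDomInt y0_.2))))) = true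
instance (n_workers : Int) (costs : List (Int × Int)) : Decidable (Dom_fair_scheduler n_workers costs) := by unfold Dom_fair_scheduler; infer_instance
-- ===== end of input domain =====

-- B sorts the jobs once (stable, descending) instead of A's repeated max-scan-and-pop, and
-- keeps only the loads of the prefix of workers that ever received a job (objective: faster).
-- A empties `costs` in place; B does not mutate it — the equivalence proved here is about
-- the return value only.

-- ===== PORT A =====
-- while(costs): to_schedule = costs.index(max(costs, key=fst)); give_to = labor.index(min(labor));
--               cost,nid = costs.pop(to_schedule); labor[give_to]+=cost; jobs[give_to].append(nid)
def fsLoopA (costs : List (Int × Int)) (jobs : List (List Int)) (labor : List Int) : List (List Int) :=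
  if costs = [] then jobs
  else
    match PySem.List.max? costs (fun x => x.1) with
    | none => jobs      -- unreachable: costs ≠ []
    | some m =>
      match PySem.List.index? costs m with
      | none => jobs    -- unreachable: m ∈ costs
      | some to_schedule =>
        match PySem.List.min? labor (fun y => y) with
        | none => jobs  -- min([]) raises ValueError in Python; excluded by Pre_
        | some mn =>
          match PySem.List.index? labor mn with
          | none => jobs  -- unreachable: mn ∈ labor
          | some give_to =>
            match hp : PySem.List.pop? costs (to_schedule : Int) with
            | none => jobs  -- unreachable: to_schedule in range
            | some (cn, rest) =>
              fsLoopA rest (jobs.modify give_to (· ++ [cn.2])) (labor.modify give_to (· + cn.1))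
  termination_by costs.length
  decreasing_by
    have := PySem.List.length_of_pop?_eq_some costs hp
    simp at this ⊢; omega

def fair_scheduler (n_workers : Int) (costs : List (Int × Int)) : List (List Int) :=
  fsLoopA costs (List.replicate n_workers.toNat []) (List.replicate n_workers.toNat 0)

-- ===== PORT B =====
-- One job: `if len(loads) < n_workers and (not loads or min(loads) > 0): append a fresh
-- worker and pick it; else: w = loads.index(min(loads)); loads[w] += cost; pjobs[w].append(nid)`.
-- `not loads or min(loads) > 0` is: every value of the optional min is positive.
def bStep (n_workers : Int) (s : List (List Int) × List Int) (cn : Int × Int) :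
    List (List Int) × List Int :=
  if ((s.2.length : Int) < n_workers ∧ ∀ m ∈ PySem.List.min? s.2 (fun y => y), 0 < m) then
    ((s.1 ++ [[]]).modify s.2.length (· ++ [cn.2]), (s.2 ++ [0]).modify s.2.length (· + cn.1))
  else
    match PySem.List.min? s.2 (fun y => y) with
    | none => s     -- min([]) raises ValueError in Python (no workers at all); excluded by Pre_
    | some m =>
      match PySem.List.index? s.2 m with
      | none => s   -- unreachable: m ∈ s.2
      | some w => (s.1.modify w (· ++ [cn.2]), s.2.modify w (· + cn.1))

-- return pjobs + [[] for _ in range(n_workers - len(pjobs))]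
def fair_scheduler_alt (n_workers : Int) (costs : List (Int × Int)) : List (List Int) :=
  let r := (PySem.List.sorted costs (fun c => c.1) true).foldl (bStep n_workers) ([], [])
  r.1 ++ List.replicate (n_workers - (r.1.length : Int)).toNat []

-- ===== PRECONDITION & SPEC =====
-- Pre_ excludes only the inputs on which A raises: with costs nonempty and no workers
-- (n_workers ≤ 0), min(labor_scheduled) is min([]) and raises ValueError (B's
-- loads.index(min(loads)) raises there too).
def Pre_fair_scheduler (n_workers : Int) (costs : List (Int × Int)) : Prop :=
  costs = [] ∨ 1 ≤ n_workers
instance (n_workers : Int) (costs : List (Int × Int)) : Decidable (Pre_fair_scheduler n_workers costs) := by unfold Pre_fair_scheduler; infer_instance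

def pvWitness_fair_scheduler : Int × (List (Int × Int)) := (2, [(3, 1), (1, 2), (3, 3)])

def Spec_fair_scheduler (n_workers : Int) (costs : List (Int × Int)) (out : List (List Int)) : Prop := out = fair_scheduler_alt n_workers costs
instance (n_workers : Int) (costs : List (Int × Int)) (out : List (List Int)) : Decidable (Spec_fair_scheduler n_workers costs out) := by unfold Spec_fair_scheduler; infer_instance

-- ===== CLAIM (what is proved, stated in full; the proofs are below) =====
def Claim_equal_fair_scheduler : Prop := ∀ (n_workers : Int) (costs : List (Int × Int)), Dom_fair_scheduler n_workers costs → Pre_fair_scheduler n_workers costs → Spec_fair_scheduler n_workers costs (fair_scheduler n_workers costs)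

-- ===== LEMMAS AND PROOFS =====

-- Python max over a cons is the plain running-max foldl from the head.
theorem fsMax?_cons (t : List (Int × Int)) : ∀ (c : Int × Int),
    PySem.List.max? (c :: t) (fun x => x.1)
      = some (t.foldl (fun m x => if m.1 < x.1 then x else m) c) := by
  induction t with
  | nil => intro c; rfl
  | cons v t ih =>
    intro c
    have h1 : PySem.List.max? (c :: v :: t) (fun x => x.1)
        = PySem.List.max? ((if c.1 < v.1 then v else c) :: t) (fun x => x.1) := by
      by_cases h : c.1 < v.1 <;> simp [PySem.List.max?, List.foldl_cons, h]
    rw [h1, ih]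
    by_cases h : c.1 < v.1 <;> simp [List.foldl_cons, h]

-- The running max keeps the FIRST element achieving the maximal key.
theorem fsMaxChar (t : List (Int × Int)) : ∀ (a : Int × Int),
    (∀ y ∈ t, y.1 ≤ (t.foldl (fun m x => if m.1 < x.1 then x else m) a).1) ∧
    a.1 ≤ (t.foldl (fun m x => if m.1 < x.1 then x else m) a).1 ∧
    ((t.foldl (fun m x => if m.1 < x.1 then x else m) a) = a ∨
      ∃ pre suf, t = pre ++ (t.foldl (fun m x => if m.1 < x.1 then x else m) a) :: suf ∧
        a.1 < (t.foldl (fun m x => if m.1 < x.1 then x else m) a).1 ∧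
        ∀ y ∈ pre, y.1 < (t.foldl (fun m x => if m.1 < x.1 then x else m) a).1) := by
  induction t with
  | nil => intro a; simp
  | cons v t ih =>
    intro a
    simp only [List.foldl_cons]
    by_cases h : a.1 < v.1
    · simp only [if_pos h]
      obtain ⟨h1, h2, h3⟩ := ih v
      refine ⟨?_, by omega, ?_⟩
      · intro y hy
        rcases List.mem_cons.mp hy with rfl | hy
        · exact h2
        · exact h1 y hy
      · rcases h3 with heq | ⟨pre, suf, ht, hlt, hpre⟩
        · exact Or.inr ⟨[], t, by rw [heq]; simp, by rw [heq]; omega, by simp⟩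
        · refine Or.inr ⟨v :: pre, suf, by rw [List.cons_append, ← ht], by omega, ?_⟩
          intro y hy
          rcases List.mem_cons.mp hy with rfl | hy
          · exact hlt
          · exact hpre y hy
    · simp only [if_neg h]
      obtain ⟨h1, h2, h3⟩ := ih a
      refine ⟨?_, h2, ?_⟩
      · intro y hy
        rcases List.mem_cons.mp hy with rfl | hy
        · omega
        · exact h1 y hy
      · rcases h3 with heq | ⟨pre, suf, ht, hlt, hpre⟩
        · exact Or.inl heq
        · refine Or.inr ⟨v :: pre, suf, by rw [List.cons_append, ← ht], hlt, ?_⟩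
          intro y hy
          rcases List.mem_cons.mp hy with rfl | hy
          · omega
          · exact hpre y hy

-- Python max returns the first element with maximal key.
theorem fsMax?_first {costs : List (Int × Int)} {m : Int × Int}
    (hne : costs ≠ []) (hm : PySem.List.max? costs (fun x => x.1) = some m) :
    ∃ pre suf, costs = pre ++ m :: suf ∧ (∀ y ∈ pre, y.1 < m.1) ∧ (∀ y ∈ suf, y.1 ≤ m.1) := by
  obtain ⟨c, t, rfl⟩ := List.exists_cons_of_ne_nil hne
  rw [fsMax?_cons] at hm
  obtain ⟨h1, h2, h3⟩ := fsMaxChar t c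
  set r := t.foldl (fun m x => if m.1 < x.1 then x else m) c with hr
  obtain rfl : r = m := Option.some.inj hm
  rcases h3 with heq | ⟨pre, suf, ht, hlt, hpre⟩
  · exact ⟨[], t, by rw [heq]; simp, by simp, h1⟩
  · refine ⟨c :: pre, suf, by rw [List.cons_append, ← ht], ?_, ?_⟩
    · intro y hy
      rcases List.mem_cons.mp hy with rfl | hy
      · exact hlt
      · exact hpre y hy
    · intro y hy
      exact h1 y (by rw [ht]; exact List.mem_append_right _ (List.mem_cons_of_mem _ hy))

-- insertBy over a head it does not go before.
theorem fsInsertBy_cons_not {α : Type} (before : α → α → Bool) (x y : α) (L : List α)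
    (h : before x y = false) :
    PySem.List.insertBy before x (y :: L) = y :: PySem.List.insertBy before x L := by
  simp [PySem.List.insertBy, h]

-- insertBy goes in front when it precedes everything in the list.
theorem fsInsertBy_front {α : Type} (before : α → α → Bool) (x : α) (L : List α)
    (h : ∀ y ∈ L, before x y = true) :
    PySem.List.insertBy before x L = x :: L := by
  cases L with
  | nil => rfl
  | cons y ys => simp [PySem.List.insertBy, h y (List.mem_cons_self)]

-- Folding further insertions below a strictly dominating head keeps the head.
theorem fsFoldIns_head (suf : List (Int × Int)) : ∀ (L : List (Int × Int)) (m : Int × Int),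
    (∀ x ∈ suf, x.1 ≤ m.1) →
    suf.foldl (fun acc x => PySem.List.insertBy (fun a b => decide (b.1 < a.1)) x acc) (m :: L)
      = m :: suf.foldl (fun acc x => PySem.List.insertBy (fun a b => decide (b.1 < a.1)) x acc) L := by
  induction suf with
  | nil => intro L m _; rfl
  | cons v t ih =>
    intro L m h
    have hv : v.1 ≤ m.1 := h v List.mem_cons_self
    simp only [List.foldl_cons]
    rw [fsInsertBy_cons_not _ _ _ _ (by simp; omega)]
    exact ih _ m (fun x hx => h x (List.mem_cons_of_mem _ hx))

-- The stable descending sort of pre ++ m :: suf, where m strictly dominates pre and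
-- weakly dominates suf, starts with m.
theorem fsSorted_split (pre suf : List (Int × Int)) (m : Int × Int)
    (hpre : ∀ y ∈ pre, y.1 < m.1) (hsuf : ∀ y ∈ suf, y.1 ≤ m.1) :
    PySem.List.sorted (pre ++ m :: suf) (fun c => c.1) true
      = m :: PySem.List.sorted (pre ++ suf) (fun c => c.1) true := by
  rw [PySem.List.sorted_rev_eq_foldl_insertBy, PySem.List.sorted_rev_eq_foldl_insertBy]
  rw [List.foldl_append, List.foldl_append, List.foldl_cons]
  have hfront : PySem.List.insertBy (fun a b => decide (b.1 < a.1)) m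
      (pre.foldl (fun acc x => PySem.List.insertBy (fun a b => decide (b.1 < a.1)) x acc) [])
      = m :: pre.foldl (fun acc x => PySem.List.insertBy (fun a b => decide (b.1 < a.1)) x acc) [] := by
    apply fsInsertBy_front
    intro y hy
    have hy' : y ∈ PySem.List.sorted pre (fun c => c.1) true := by
      rw [PySem.List.sorted_rev_eq_foldl_insertBy]; exact hy
    have : y ∈ pre := (PySem.List.mem_sorted _ _ _ _).mp hy'
    simp; exact hpre y this
  rw [hfront]
  exact fsFoldIns_head suf _ m hsuf

-- folding min over a nonempty block of zeros clamps at 0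
theorem fsFoldlMin_replicate (z : Nat) : ∀ (a : Int), 1 ≤ z →
    (List.replicate z (0 : Int)).foldl min a = min a 0 := by
  induction z with
  | zero => intro a h; omega
  | succ k ih =>
    intro a _
    rw [List.replicate_succ, List.foldl_cons]
    rcases Nat.eq_zero_or_pos k with rfl | hk
    · rfl
    · rw [ih (min a 0) hk, min_assoc, min_self]

-- min over the prefix loads padded with idle (0) workers
theorem fsMin?_append_replicate (loads : List Int) (z : Nat) (hz : 1 ≤ z) :
    PySem.List.min? (loads ++ List.replicate z (0 : Int)) (fun y => y)
      = some (match PySem.List.min? loads (fun y => y) with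
              | none => 0
              | some m => min m 0) := by
  cases loads with
  | nil =>
    obtain ⟨k, rfl⟩ : ∃ k, z = k + 1 := ⟨z - 1, by omega⟩
    rw [List.nil_append, List.replicate_succ, PySem.List.min?_id_cons]
    rcases Nat.eq_zero_or_pos k with rfl | hk
    · rfl
    · rw [fsFoldlMin_replicate k 0 hk]
      simp [PySem.List.min?]
  | cons x t =>
    rw [List.cons_append, PySem.List.min?_id_cons, PySem.List.min?_id_cons,
        List.foldl_append, fsFoldlMin_replicate z _ hz]

-- List.modify inside / just past the left part of an append
theorem fsModify_append_lt {α : Type} (l : List α) : ∀ (l' : List α) (i : Nat) (f : α → α),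
    i < l.length → (l ++ l').modify i f = l.modify i f ++ l' := by
  induction l with
  | nil => intro l' i f h; simp at h
  | cons x t ih =>
    intro l' i f h
    cases i with
    | zero => simp [List.modify_zero_cons]
    | succ j =>
      simp only [List.cons_append, List.modify_succ_cons]
      rw [ih l' j f (by simpa using h)]

theorem fsModify_append_len {α : Type} (l : List α) : ∀ (l' : List α) (f : α → α),
    (l ++ l').modify l.length f = l ++ l'.modify 0 f := by
  induction l with
  | nil => intro l' f; simp
  | cons x t ih =>
    intro l' f
    simp only [List.cons_append, List.length_cons, List.modify_succ_cons]
    rw [ih l' f]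

-- One scheduling step: A's first-argmin over the full (prefix ++ idle zeros) load list
-- is exactly B's prefix bookkeeping.
theorem fsStep_rep (nw : Int) (pjobs : List (List Int)) (loads : List Int) (cn : Int × Int)
    (hlen : loads.length = pjobs.length) (hle : loads.length ≤ nw.toNat) (hpos : 1 ≤ nw.toNat) :
    ∃ μ w,
      PySem.List.min? (loads ++ List.replicate (nw.toNat - loads.length) 0) (fun y => y) = some μ ∧
      PySem.List.index? (loads ++ List.replicate (nw.toNat - loads.length) 0) μ = some w ∧
      (pjobs ++ List.replicate (nw.toNat - pjobs.length) []).modify w (· ++ [cn.2])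
        = (bStep nw (pjobs, loads) cn).1
            ++ List.replicate (nw.toNat - (bStep nw (pjobs, loads) cn).1.length) [] ∧
      (loads ++ List.replicate (nw.toNat - loads.length) 0).modify w (· + cn.1)
        = (bStep nw (pjobs, loads) cn).2
            ++ List.replicate (nw.toNat - (bStep nw (pjobs, loads) cn).2.length) 0 ∧
      (bStep nw (pjobs, loads) cn).2.length = (bStep nw (pjobs, loads) cn).1.length ∧
      (bStep nw (pjobs, loads) cn).2.length ≤ nw.toNat := by
  by_cases hc : ((loads.length : Int) < nw ∧ ∀ m ∈ PySem.List.min? loads (fun y => y), 0 < m)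
  · -- a fresh worker is opened
    have hB : bStep nw (pjobs, loads) cn
        = ((pjobs ++ [[]]).modify loads.length (· ++ [cn.2]),
           (loads ++ [0]).modify loads.length (· + cn.1)) := by
      simp only [bStep]; rw [if_pos hc]
    have hz : 1 ≤ nw.toNat - loads.length := by
      have := hc.1; omega
    have h0notin : (0 : Int) ∉ loads := by
      intro h0
      cases hml : PySem.List.min? loads (fun y => y) with
      | none => rw [PySem.List.min?_eq_none_iff] at hml; simp [hml] at h0
      | some m =>
        have h1 := PySem.List.min?_isMin hml 0 h0
        have h2 := hc.2 m (by rw [hml]; exact Option.mem_def.mpr rfl)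
        simp at h1; omega
    have hrep : List.replicate (nw.toNat - loads.length) (0 : Int)
        = 0 :: List.replicate (nw.toNat - loads.length - 1) 0 := by
      obtain ⟨k, hk⟩ : ∃ k, nw.toNat - loads.length = k + 1 := ⟨nw.toNat - loads.length - 1, by omega⟩
      rw [hk, List.replicate_succ]; simp
    refine ⟨0, loads.length, ?_, ?_, ?_, ?_, ?_, ?_⟩
    · rw [fsMin?_append_replicate loads _ hz]
      cases hml : PySem.List.min? loads (fun y => y) with
      | none => rfl
      | some m =>
        have h2 := hc.2 m (by rw [hml]; exact Option.mem_def.mpr rfl)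
        simp [min_eq_right (le_of_lt h2)]
    · rw [hrep, PySem.List.index?_eq_some_iff]
      exact ⟨loads, _, rfl, rfl, h0notin⟩
    · simp only [hB]
      rw [hlen, fsModify_append_len pjobs, fsModify_append_len pjobs]
      have hz' : nw.toNat - pjobs.length = (nw.toNat - (pjobs.length + 1)) + 1 := by omega
      rw [hz', List.replicate_succ, List.modify_zero_cons, List.modify_zero_cons]
      simp [List.length_append, List.append_assoc]
    · simp only [hB]
      rw [fsModify_append_len loads, fsModify_append_len loads]
      have hz' : nw.toNat - loads.length = (nw.toNat - (loads.length + 1)) + 1 := by omega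
      rw [hz', List.replicate_succ, List.modify_zero_cons, List.modify_zero_cons]
      simp [List.length_append, List.append_assoc]
    · simp [hB, List.length_modify, List.length_append, hlen]
    · simp only [hB]
      simp [List.length_modify, List.length_append]
      omega
  · -- an already-touched worker is picked (or Python raises: loads empty, no room)
    have hm0 : loads ≠ [] := by
      intro h; subst h
      simp [PySem.List.min?] at hc
      omega
    obtain ⟨m, hml⟩ : ∃ m, PySem.List.min? loads (fun y => y) = some m := by
      cases h : PySem.List.min? loads (fun y => y) with
      | none => exact absurd ((PySem.List.min?_eq_none_iff _ _).mp h) hm0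
      | some m => exact ⟨m, rfl⟩
    obtain ⟨w, hw⟩ : ∃ w, PySem.List.index? loads m = some w :=
      Option.isSome_iff_exists.mp
        ((PySem.List.index?_isSome_iff _ _).mpr (PySem.List.min?_mem hml))
    have hB : bStep nw (pjobs, loads) cn
        = (pjobs.modify w (· ++ [cn.2]), loads.modify w (· + cn.1)) := by
      simp only [bStep]; rw [if_neg hc]; simp only [hml, hw]
    have hwlt : w < loads.length := by
      obtain ⟨hk, -, -⟩ := PySem.List.getElem_of_index?_eq_some hw; exact hk
    rcases Nat.eq_zero_or_pos (nw.toNat - loads.length) with hz0 | hz1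
    · -- every worker is already touched: no padding
      have hzj : nw.toNat - pjobs.length = 0 := by omega
      refine ⟨m, w, ?_, ?_, ?_, ?_, ?_, ?_⟩
      · rw [hz0]; simpa using hml
      · rw [hz0]; simpa using hw
      · simp [hB, hzj, List.length_modify]
      · simp [hB, hz0, List.length_modify]
      · simp [hB, List.length_modify, hlen]
      · simp [hB, List.length_modify]; omega
    · -- idle workers remain, so the prefix min must be ≤ 0
      have hmle : m ≤ 0 := by
        have hlt : (loads.length : Int) < nw := by omega
        by_contra hpos'
        exact hc ⟨hlt, by
          intro m' hm'
          rw [hml, Option.mem_def, Option.some.injEq] at hm'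
          omega⟩
      refine ⟨m, w, ?_, ?_, ?_, ?_, ?_, ?_⟩
      · rw [fsMin?_append_replicate loads _ hz1, hml]
        simp [min_eq_left hmle]
      · rw [PySem.List.index?_append_of_mem _ (PySem.List.min?_mem hml)]; exact hw
      · simp only [hB]
        rw [fsModify_append_lt pjobs _ w _ (hlen ▸ hwlt)]
        simp [List.length_modify]
      · simp only [hB]
        rw [fsModify_append_lt loads _ w _ hwlt]
        simp [List.length_modify]
      · simp [hB, List.length_modify, hlen]
      · simp [hB, List.length_modify]; omega

-- Main loop equivalence: A's extract-first-max loop over the full worker arrays equals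
-- B's fold over the stable descending sort carrying only the touched prefix.
theorem fsLoop_rep (n : Nat) : ∀ (costs : List (Int × Int)) (nw : Int)
    (pjobs : List (List Int)) (loads : List Int),
    costs.length = n → loads.length = pjobs.length → loads.length ≤ nw.toNat → 1 ≤ nw.toNat →
    fsLoopA costs (pjobs ++ List.replicate (nw.toNat - pjobs.length) [])
                  (loads ++ List.replicate (nw.toNat - loads.length) 0)
      = ((PySem.List.sorted costs (fun c => c.1) true).foldl (bStep nw) (pjobs, loads)).1
          ++ List.replicate (nw.toNat
              - ((PySem.List.sorted costs (fun c => c.1) true).foldl (bStep nw) (pjobs, loads)).1.length) []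
    ∧ ((PySem.List.sorted costs (fun c => c.1) true).foldl (bStep nw) (pjobs, loads)).1.length ≤ nw.toNat := by
  induction n with
  | zero =>
    intro costs nw pjobs loads hlen hlp hle hpos
    have hnil : costs = [] := List.length_eq_zero_iff.mp hlen
    subst hnil
    constructor
    · rw [fsLoopA]; simp [PySem.List.sorted]
    · simp [PySem.List.sorted]; omega
  | succ n ih =>
    intro costs nw pjobs loads hlen hlp hle hpos
    have hne : costs ≠ [] := by intro h; rw [h] at hlen; simp at hlen
    obtain ⟨m, hm⟩ : ∃ m, PySem.List.max? costs (fun x => x.1) = some m := by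
      cases hmx : PySem.List.max? costs (fun x => x.1) with
      | none => exact absurd ((PySem.List.max?_eq_none_iff _ _).mp hmx) hne
      | some m => exact ⟨m, rfl⟩
    obtain ⟨pre, suf, hsplit, hpre, hsuf⟩ := fsMax?_first hne hm
    have hnotin : m ∉ pre := fun h => by have := hpre m h; omega
    have hidx : PySem.List.index? costs m = some pre.length := by
      rw [PySem.List.index?_eq_some_iff]
      exact ⟨pre, suf, hsplit, rfl, hnotin⟩
    obtain ⟨hplen, hget, -⟩ := PySem.List.getElem_of_index?_eq_some hidx
    have hpop : PySem.List.pop? costs (pre.length : Int)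
        = some (costs[pre.length], costs.eraseIdx pre.length) :=
      PySem.List.pop?_natCast costs pre.length hplen
    have herase : costs.eraseIdx pre.length = pre ++ suf := by
      rw [hsplit, List.eraseIdx_append_of_length_le (le_refl pre.length)]
      simp
    simp only [hget, herase] at hpop
    obtain ⟨μ, w, hmin, hgive, hjobs, hloads, hlp', hle'⟩ := fsStep_rep nw pjobs loads m hlp hle hpos
    have hlen' : (pre ++ suf).length = n := by
      rw [hsplit] at hlen; simp at hlen ⊢; omega
    have hfoldl : (PySem.List.sorted costs (fun c => c.1) true).foldl (bStep nw) (pjobs, loads)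
        = (PySem.List.sorted (pre ++ suf) (fun c => c.1) true).foldl (bStep nw)
            ((bStep nw (pjobs, loads) m).1, (bStep nw (pjobs, loads) m).2) := by
      rw [hsplit, fsSorted_split pre suf m hpre hsuf, List.foldl_cons, Prod.mk.eta]
    obtain ⟨ih1, ih2⟩ := ih (pre ++ suf) nw (bStep nw (pjobs, loads) m).1
      (bStep nw (pjobs, loads) m).2 hlen' hlp' hle' hpos
    constructor
    · rw [fsLoopA]
      simp only [if_neg hne, hm, hidx, hmin, hgive]
      split
      · next heq2 => rw [hpop] at heq2; exact absurd heq2 (by simp)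
      · next cn rest heq2 =>
          rw [hpop] at heq2
          have hinj := Option.some.inj heq2
          obtain ⟨rfl, rfl⟩ : m = cn ∧ pre ++ suf = rest :=
            ⟨congrArg Prod.fst hinj, congrArg Prod.snd hinj⟩
          rw [hjobs, hloads, hfoldl]
          exact ih1
    · rw [hfoldl]
      exact ih2

-- ===== VERDICT (by name: the statement is the Claim_ definition above) =====
theorem fair_scheduler_spec : Claim_equal_fair_scheduler := by
  intro n_workers costs _ hpre
  unfold Spec_fair_scheduler fair_scheduler fair_scheduler_alt
  rcases hpre with rfl | hn
  · rw [fsLoopA]; simp [PySem.List.sorted]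
  · have hpos : 1 ≤ n_workers.toNat := by omega
    obtain ⟨heq, hlen⟩ := fsLoop_rep costs.length costs n_workers [] [] rfl rfl (by simp) hpos
    simp only [List.nil_append, List.length_nil, Nat.sub_zero] at heq
    have harith : (n_workers
          - (((PySem.List.sorted costs (fun c => c.1) true).foldl (bStep n_workers) ([], [])).1.length : Int)).toNat
        = n_workers.toNat
          - ((PySem.List.sorted costs (fun c => c.1) true).foldl (bStep n_workers) ([], [])).1.length := by
      omega
    show _ = ((PySem.List.sorted costs (fun c => c.1) true).foldl (bStep n_workers) ([], [])).1
        ++ List.replicate (n_workers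
            - (((PySem.List.sorted costs (fun c => c.1) true).foldl (bStep n_workers) ([], [])).1.length : Int)).toNat []
    rw [heq, harith]
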